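-- pv_equiv track=rewrite | github.com/AudenCote/Battle-O-Matic | matrix.py | elementwise_addition
-- ===== SOURCE A (Python) =====
-- def get_shape(input_array):
--     shape = []
--
--     i = 0
--     while True:
--         try:
--             sum = 0
--             for j in range(len(input_array)):
--                 sum += 1
--             shape.append(sum)
--
--             input_array = input_array[0]
--
--             i += 1
--         except TypeError:
--             break
--
--     return shape
--
-- def flatten(lst):
--     def flatten_inner(lst):
--         if isinstance(lst, list):
--             for l in lst:
--                 for y in flatten(l):
--                     yield y
--         else:
--             yield lst
--
--     flattened = flatten_inner(lst)
--     return [val for val in flattened]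
--
-- def make_shape(shape, ls):
--     for idx in range(len(shape) - 1):
--         main = []
--         for j, elem in enumerate(ls):
--             if j % shape[idx] == 0:
--                 main.append(ls[j:j + shape[idx]])
--         ls = main
--
--     return main
--
-- def elementwise_addition(arr1, arr2):
--     shape = get_shape(arr1)
--
--     f1 = flatten(arr1)
--     f2 = flatten(arr2)
--
--     new = []
--     for i, _ in enumerate(f1):
--         new.append(f1[i] + f2[i])
--
--     shape.reverse()
--     new = make_shape(shape, new)
--     return new
-- ===== SOURCE B (Python) =====
-- def elementwise_addition(arr1, arr2):
--     m = len(arr1[0])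
--     flat = [x + y for x, y in zip((v for row in arr1 for v in row),
--                                   (v for row in arr2 for v in row))]
--     return [flat[k:k + m] for k in range(0, len(flat), m)]
-- ===== Notes on version B (the rewrite author's own statement) =====
-- stated objective: simpler
-- what changed: Replaced the shape-detection / generator-flatten / modulo-based make_shape pipeline by a single zip of the two flattened generators followed by slicing the summed flat list into rows of len(arr1[0]) with a stepped range.
import Mathlib
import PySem

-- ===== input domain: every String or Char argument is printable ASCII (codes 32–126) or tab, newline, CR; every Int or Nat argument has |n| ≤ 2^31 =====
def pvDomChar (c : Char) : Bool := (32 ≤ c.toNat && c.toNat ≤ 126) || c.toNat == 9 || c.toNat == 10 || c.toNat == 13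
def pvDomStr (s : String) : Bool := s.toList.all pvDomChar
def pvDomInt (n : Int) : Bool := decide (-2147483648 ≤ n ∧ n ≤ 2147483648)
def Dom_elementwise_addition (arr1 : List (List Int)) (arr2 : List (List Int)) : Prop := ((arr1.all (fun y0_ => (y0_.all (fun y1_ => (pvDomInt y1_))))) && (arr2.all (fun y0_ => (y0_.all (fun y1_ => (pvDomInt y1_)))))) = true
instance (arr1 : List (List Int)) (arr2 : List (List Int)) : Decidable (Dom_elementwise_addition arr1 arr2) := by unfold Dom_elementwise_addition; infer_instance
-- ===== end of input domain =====

-- B replaces A's get_shape/flatten/make_shape pipeline by one zip of the flattened inputs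
-- plus slicing into rows of len(arr1[0]); objective: simpler and measured faster (constant factor), same value on every input where A returns.


-- ===== PORT A =====
-- len(x) computed by A's `sum = 0; for j in range(len(x)): sum += 1` loop
def pvLenLoop (n : Nat) : Int := (List.range n).foldl (fun s _ => s + 1) 0

-- get_shape on a depth-2 list: iteration 1 appends len(arr1) and sets input_array = arr1[0]
-- (IndexError → none); iteration 2 appends len(row) and sets input_array = row[0] (IndexError → none);
-- iteration 3 calls len on an int, TypeError, break.
def get_shape (arr1 : List (List Int)) : Option (List Int) :=
  let shape : List Int := [] ++ [pvLenLoop arr1.length]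
  match PySem.List.pyGet? arr1 0 with
  | none => none
  | some row =>
    let shape := shape ++ [pvLenLoop row.length]
    match PySem.List.pyGet? row 0 with
    | none => none
    | some _ => some shape

-- flatten: the generator yields every element of every row, collected into a list
def flattenPy (lst : List (List Int)) : List Int :=
  lst.foldl (fun acc row => acc ++ row.foldl (fun a v => a ++ [v]) []) []

-- `for i, _ in enumerate(f1): new.append(f1[i] + f2[i])`; none = IndexError on f2
def buildNew (f1 f2 : List Int) : Option (List Int) :=
  (PySem.List.enumerate f1).foldl
    (fun acc p => acc.bind (fun l =>
      match PySem.List.pyGet? f1 p.1, PySem.List.pyGet? f2 p.1 with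
      | some x, some y => some (l ++ [x + y])
      | _, _ => none)) (some [])

-- make_shape: on a depth-2 input shape has length 2, so the outer `for idx in range(len(shape)-1)`
-- loop body runs exactly once with idx = 0; ported as that single pass.
def make_shape (shape : List Int) (ls : List Int) : List (List Int) :=
  (PySem.List.enumerate ls).foldl
    (fun main p =>
      if PySem.Int.mod p.1 (PySem.List.pyGetD shape 0 0) == 0 then
        main ++ [PySem.List.slice ls (some p.1) (some (p.1 + PySem.List.pyGetD shape 0 0))]
      else main) []

def elementwise_addition (arr1 : List (List Int)) (arr2 : List (List Int)) : List (List Int) :=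
  match get_shape arr1 with
  | none => []           -- Python raises IndexError here; excluded by Pre_
  | some shape =>
    let f1 := flattenPy arr1
    let f2 := flattenPy arr2
    match buildNew f1 f2 with
    | none => []         -- Python raises IndexError here; excluded by Pre_
    | some new =>
      make_shape shape.reverse new

-- ===== PORT B =====
def elementwise_addition_alt (arr1 : List (List Int)) (arr2 : List (List Int)) : List (List Int) :=
  let m : Int := ((arr1.headD []).length : Int)  -- len(arr1[0]); IndexError on empty arr1 is outside Pre_
  let flat := (List.zip (arr1.flatMap id) (arr2.flatMap id)).map (fun p => p.1 + p.2)
  (PySem.List.pyRange 0 (flat.length : Int) m).map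
    (fun k => PySem.List.slice flat (some k) (some (k + m)))

-- ===== PRECONDITION & SPEC =====
-- Pre_ = exactly the inputs where A returns: arr1 and its first row nonempty (else get_shape hits
-- an IndexError) and flatten(arr2) at least as long as flatten(arr1) (else f2[i] raises IndexError).
def Pre_elementwise_addition (arr1 : List (List Int)) (arr2 : List (List Int)) : Prop :=
  arr1 ≠ [] ∧ arr1.headD [] ≠ [] ∧ (arr1.flatMap id).length ≤ (arr2.flatMap id).length
instance (arr1 : List (List Int)) (arr2 : List (List Int)) : Decidable (Pre_elementwise_addition arr1 arr2) := by unfold Pre_elementwise_addition; infer_instance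

def pvWitness_elementwise_addition : List (List Int) × List (List Int) :=
  ([[1, 2], [3, 4]], [[10, 20], [30, 40]])

def Spec_elementwise_addition (arr1 : List (List Int)) (arr2 : List (List Int)) (out : List (List Int)) : Prop := out = elementwise_addition_alt arr1 arr2
instance (arr1 : List (List Int)) (arr2 : List (List Int)) (out : List (List Int)) : Decidable (Spec_elementwise_addition arr1 arr2 out) := by unfold Spec_elementwise_addition; infer_instance

-- ===== CLAIM (what is proved, stated in full; the proofs are below) =====
def Claim_equal_elementwise_addition : Prop := ∀ (arr1 : List (List Int)) (arr2 : List (List Int)), Dom_elementwise_addition arr1 arr2 → Pre_elementwise_addition arr1 arr2 → Spec_elementwise_addition arr1 arr2 (elementwise_addition arr1 arr2)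

-- ===== LEMMAS AND PROOFS =====

theorem pvLenLoop_eq (n : Nat) : pvLenLoop n = (n : Int) := by
  induction n with
  | zero => simp [pvLenLoop]
  | succ k ih =>
    simp only [pvLenLoop, List.range_succ, List.foldl_append, List.foldl_cons, List.foldl_nil] at *
    omega

theorem flattenPy_aux : ∀ (l : List (List Int)) (init : List Int),
    l.foldl (fun acc row => acc ++ row.foldl (fun a v => a ++ [v]) []) init = init ++ l.flatMap id := by
  intro l
  induction l with
  | nil => intro init; simp
  | cons row rest ih =>
    intro init
    have hrow : row.foldl (fun a v => a ++ [v]) [] = row := by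
      simpa using PySem.List.foldl_append_singleton_eq_map (f := id) row []
    rw [List.foldl_cons, hrow, ih, List.flatMap_cons]
    simp

theorem flattenPy_eq (lst : List (List Int)) : flattenPy lst = lst.flatMap id := by
  rw [flattenPy, flattenPy_aux, List.nil_append]

theorem buildNew_go (f1 f2 : List Int) (h2 : f1.length ≤ f2.length) :
    ∀ (l : List Int) (s : Nat) (pref : List Int), l = f1.drop s →
    (PySem.List.enumerate l (s : Int)).foldl
      (fun acc p => acc.bind (fun cur =>
        match PySem.List.pyGet? f1 p.1, PySem.List.pyGet? f2 p.1 with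
        | some x, some y => some (cur ++ [x + y])
        | _, _ => none)) (some pref)
      = some (pref ++ List.zipWith (· + ·) (f1.drop s) (f2.drop s)) := by
  intro l
  induction l with
  | nil =>
    intro s pref hdrop
    rw [← hdrop]
    simp [PySem.List.enumerate]
  | cons x rest ih =>
    intro s pref hdrop
    have hs1 : s < f1.length := by
      by_contra hge
      rw [List.drop_eq_nil_of_le (by omega)] at hdrop
      exact List.cons_ne_nil _ _ hdrop
    have hs2 : s < f2.length := by omega
    have hd1 : f1.drop s = f1[s] :: f1.drop (s + 1) := List.drop_eq_getElem_cons hs1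
    have hd2 : f2.drop s = f2[s] :: f2.drop (s + 1) := List.drop_eq_getElem_cons hs2
    obtain ⟨hx, hrest⟩ := List.cons_eq_cons.mp (hdrop.trans hd1)
    have hg1 : PySem.List.pyGet? f1 (s : Int) = some f1[s] := by
      rw [PySem.List.pyGet?_natCast]; exact List.getElem?_eq_getElem hs1
    have hg2 : PySem.List.pyGet? f2 (s : Int) = some f2[s] := by
      rw [PySem.List.pyGet?_natCast]; exact List.getElem?_eq_getElem hs2
    have hcast : (s : Int) + 1 = ((s + 1 : Nat) : Int) := by push_cast; ring
    rw [PySem.List.enumerate_cons, List.foldl_cons]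
    simp only [Option.bind_some, hg1, hg2, hcast]
    rw [ih (s + 1) (pref ++ [f1[s] + f2[s]]) hrest, hd1, hd2, List.zipWith_cons_cons]
    simp

theorem buildNew_eq (f1 f2 : List Int) (h : f1.length ≤ f2.length) :
    buildNew f1 f2 = some (List.zipWith (· + ·) f1 f2) := by
  have := buildNew_go f1 f2 h f1 0 [] (by simp)
  simpa [buildNew] using this

-- range(0, L) filtered to multiples of m is range(0, L, m)
theorem filter_mod_pyRange (L : Nat) (m : Int) (hm : 0 < m) :
    (PySem.List.pyRange 0 (L : Int) 1).filter (fun i => PySem.Int.mod i m == 0)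
      = PySem.List.pyRange 0 (L : Int) m := by
  have hmemL : ∀ x : Int, x ∈ (PySem.List.pyRange 0 (L : Int) 1).filter (fun i => PySem.Int.mod i m == 0)
      ↔ (0 ≤ x ∧ x < (L : Int) ∧ m ∣ x) := by
    intro x
    rw [List.mem_filter, PySem.List.mem_pyRange_one]
    constructor
    · rintro ⟨⟨ha, hb⟩, hc⟩
      exact ⟨ha, hb, (PySem.Int.mod_eq_zero_iff_dvd x m).1 (by simpa using hc)⟩
    · rintro ⟨ha, hb, hc⟩
      exact ⟨⟨ha, hb⟩, by simpa using (PySem.Int.mod_eq_zero_iff_dvd x m).2 hc⟩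
  have hmemR : ∀ x : Int, x ∈ PySem.List.pyRange 0 (L : Int) m ↔ (0 ≤ x ∧ x < (L : Int) ∧ m ∣ x) := by
    intro x
    rw [PySem.List.mem_pyRange_iff_of_pos hm]
    constructor
    · rintro ⟨u, v, w⟩; rw [sub_zero] at w; exact ⟨u, v, w⟩
    · rintro ⟨u, v, w⟩; rw [sub_zero]; exact ⟨u, v, w⟩
  have hpwL : ((PySem.List.pyRange 0 (L : Int) 1).filter (fun i => PySem.Int.mod i m == 0)).Pairwise (· < ·) :=
    (PySem.List.pairwise_lt_pyRange_one 0 (L : Int)).filter _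
  have hpwR : (PySem.List.pyRange 0 (L : Int) m).Pairwise (· < ·) := by
    rw [PySem.List.pyRange_of_pos 0 (L : Int) hm]
    rw [List.pairwise_map]
    exact (List.pairwise_lt_range).imp (fun {a b} hab => by
      have hab' : (a : Int) < (b : Int) := by exact_mod_cast hab
      nlinarith)
  have hperm : ((PySem.List.pyRange 0 (L : Int) 1).filter (fun i => PySem.Int.mod i m == 0)).Perm
      (PySem.List.pyRange 0 (L : Int) m) := by
    apply List.perm_of_nodup_nodup_toFinset_eq
    · exact hpwL.imp (fun hab => ne_of_lt hab)
    · exact hpwR.imp (fun hab => ne_of_lt hab)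
    · ext x
      simp only [List.mem_toFinset]
      rw [hmemL, hmemR]
  exact List.eq_of_perm_of_sorted (fun a b _ _ hab hba => absurd hba (not_lt.mpr hab.le)) hpwL hpwR hperm

theorem map_add_zip (l1 l2 : List Int) :
    (List.zip l1 l2).map (fun p => p.1 + p.2) = List.zipWith (· + ·) l1 l2 := by
  induction l1 generalizing l2 with
  | nil => simp
  | cons x xs ih => cases l2 <;> simp [ih]

-- the single make_shape pass equals slicing at the multiples of m
theorem make_shape_eq (m n : Int) (ls : List Int) (hm : 0 < m) :
    make_shape [m, n] ls
      = (PySem.List.pyRange 0 (ls.length : Int) m).map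
          (fun k => PySem.List.slice ls (some k) (some (k + m))) := by
  have hget : PySem.List.pyGetD ([m, n] : List Int) 0 0 = m := by
    simp [PySem.List.pyGetD]
  unfold make_shape
  simp only [hget]
  refine (PySem.List.foldl_append_if (fun q : Int × Int => PySem.Int.mod q.1 m == 0)
      (fun q : Int × Int => PySem.List.slice ls (some q.1) (some (q.1 + m)))
      (PySem.List.enumerate ls) []).trans ?_
  rw [List.nil_append]
  have h1 : (PySem.List.enumerate ls 0).map Prod.fst = PySem.List.pyRange 0 ((ls.length : Int)) 1 := by
    simpa using PySem.List.map_fst_enumerate ls 0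
  rw [← filter_mod_pyRange ls.length m hm, ← h1, List.filter_map, List.map_map]
  rfl

-- ===== VERDICT (by name: the statement is the Claim_ definition above) =====
theorem elementwise_addition_spec : Claim_equal_elementwise_addition := by
  intro arr1 arr2 _hdom hpre
  obtain ⟨h1, h2, h3⟩ := hpre
  obtain ⟨r, t, rfl⟩ : ∃ r t, arr1 = r :: t := by
    cases arr1 with
    | nil => exact absurd rfl h1
    | cons r t => exact ⟨r, t, rfl⟩
  obtain ⟨a, r', rfl⟩ : ∃ a r', r = a :: r' := by
    cases r with
    | nil => simp at h2
    | cons a r' => exact ⟨a, r', rfl⟩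
  have hg1 : PySem.List.pyGet? (((a :: r') :: t) : List (List Int)) 0 = some (a :: r') := by
    simp [PySem.List.pyGet?, PySem.List.pyIdx?]
  have hg2 : PySem.List.pyGet? ((a :: r') : List Int) 0 = some a := by
    simp [PySem.List.pyGet?, PySem.List.pyIdx?]
  unfold Spec_elementwise_addition
  simp only [elementwise_addition, elementwise_addition_alt, get_shape, hg1, hg2,
    flattenPy_eq, buildNew_eq _ _ h3]
  simp only [List.reverse_cons, List.reverse_nil, List.nil_append, List.cons_append]
  set f1 := ((a :: r') :: t).flatMap id with hf1
  set f2 := arr2.flatMap id with hf2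
  set new := List.zipWith (· + ·) f1 f2 with hnew
  have hlen : pvLenLoop (a :: r').length = ((r'.length + 1 : Nat) : Int) := by
    rw [pvLenLoop_eq]; simp
  have hmpos : (0 : Int) < ((r'.length + 1 : Nat) : Int) := by positivity
  rw [show ([pvLenLoop (a :: r').length, pvLenLoop ((a :: r') :: t).length] : List Int)
        = [((r'.length + 1 : Nat) : Int), pvLenLoop ((a :: r') :: t).length] from by rw [hlen]]
  rw [make_shape_eq _ _ _ hmpos]
  have hflat : (List.zip f1 f2).map (fun p => p.1 + p.2) = new := map_add_zip f1 f2
  have hm' : ((((a :: r') :: t).headD []).length : Int) = ((r'.length + 1 : Nat) : Int) := by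
    simp
  rw [hflat, hm']
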